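-- pv_equiv track=rewrite | github.com/julius-thomas/fl-ms-thesis | src/datasets/mimic4.py | _px_chapter
-- ===== SOURCE A (Python) =====
-- _ICD9_PX_RANGES = [
--     (1, 5, 'nervous_proc'), (30, 34, 'respiratory_proc'),
--     (35, 39, 'cardiovascular_proc'), (42, 54, 'digestive_proc'),
--     (55, 71, 'genitourinary_proc'), (76, 84, 'musculoskeletal_proc'),
-- ]
--
-- _ICD10_PCS_BODY = {
--     '0': 'nervous_proc', '1': 'nervous_proc',
--     '2': 'cardiovascular_proc', '3': 'cardiovascular_proc',
--     '4': 'cardiovascular_proc', '5': 'cardiovascular_proc',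
--     '6': 'cardiovascular_proc',
--     'B': 'respiratory_proc',
--     'C': 'digestive_proc', 'D': 'digestive_proc', 'F': 'digestive_proc',
--     'T': 'genitourinary_proc', 'U': 'genitourinary_proc',
--     'V': 'genitourinary_proc',
--     'L': 'musculoskeletal_proc', 'M': 'musculoskeletal_proc',
--     'N': 'musculoskeletal_proc', 'P': 'musculoskeletal_proc',
--     'Q': 'musculoskeletal_proc', 'R': 'musculoskeletal_proc',
--     'S': 'musculoskeletal_proc',
-- }
--
-- def _px_chapter(code, version):
--     """Map an ICD procedure code to a broad group."""
--     code = str(code).strip()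
--     if version == 9:
--         try:
--             n = int(code[:2])
--         except ValueError:
--             return 'other_proc'
--         for lo, hi, ch in _ICD9_PX_RANGES:
--             if lo <= n <= hi:
--                 return ch
--         return 'other_proc'
--     else:
--         if len(code) < 2 or code[0] != '0':
--             return 'other_proc'
--         return _ICD10_PCS_BODY.get(code[1].upper(), 'other_proc')
-- ===== SOURCE B (Python) =====
-- # B: ICD9 branch classified by binary search over sorted breakpoints (no range scan,
-- # no dict); ICD10 branch classified by scanning character groups instead of a dict.
--
-- _ICD9_PX_BOUNDS = (1, 6, 30, 35, 40, 42, 55, 72, 76, 85)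
-- _ICD9_PX_LABELS = ('other_proc', 'nervous_proc', 'other_proc', 'respiratory_proc',
--                    'cardiovascular_proc', 'other_proc', 'digestive_proc',
--                    'genitourinary_proc', 'other_proc', 'musculoskeletal_proc',
--                    'other_proc')
--
-- _ICD10_PCS_GROUPS = (
--     ('01', 'nervous_proc'),
--     ('23456', 'cardiovascular_proc'),
--     ('B', 'respiratory_proc'),
--     ('CDF', 'digestive_proc'),
--     ('TUV', 'genitourinary_proc'),
--     ('LMNPQRS', 'musculoskeletal_proc'),
-- )
--
--
-- def _bisect_right(bounds, x):
--     lo, hi = 0, len(bounds)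
--     while lo < hi:
--         mid = (lo + hi) // 2
--         if x < bounds[mid]:
--             hi = mid
--         else:
--             lo = mid + 1
--     return lo
--
--
-- def _px_chapter(code, version):
--     """Map an ICD procedure code to a broad group."""
--     code = str(code).strip()
--     if version == 9:
--         try:
--             n = int(code[:2])
--         except ValueError:
--             return 'other_proc'
--         return _ICD9_PX_LABELS[_bisect_right(_ICD9_PX_BOUNDS, n)]
--     if len(code) < 2 or code[0] != '0':
--         return 'other_proc'
--     c = code[1].upper()
--     for chars, ch in _ICD10_PCS_GROUPS:
--         if c in chars:
--             return ch
--     return 'other_proc'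
-- ===== Notes on version B (the rewrite author's own statement) =====
-- stated objective: alternative
-- what changed: The ICD9 branch classifies the two-digit number by a hand-written binary search over a sorted breakpoint array indexing a label table instead of scanning six (lo, hi, label) ranges, and the ICD10 branch scans six character groups instead of looking up a 21-key dict.
import Mathlib
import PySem

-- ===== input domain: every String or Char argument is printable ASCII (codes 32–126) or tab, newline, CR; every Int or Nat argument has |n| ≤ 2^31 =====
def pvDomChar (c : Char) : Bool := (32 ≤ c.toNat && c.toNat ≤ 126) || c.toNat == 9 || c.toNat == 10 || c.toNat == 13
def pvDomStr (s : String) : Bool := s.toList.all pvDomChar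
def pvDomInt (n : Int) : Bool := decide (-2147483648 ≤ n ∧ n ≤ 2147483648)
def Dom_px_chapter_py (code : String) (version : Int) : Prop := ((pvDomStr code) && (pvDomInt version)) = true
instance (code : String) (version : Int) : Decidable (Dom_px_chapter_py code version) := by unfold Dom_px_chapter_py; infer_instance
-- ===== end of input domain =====

-- ===== PORT A =====
-- B replaces A's sequential scan over six ICD9 ranges by a binary search over sorted
-- breakpoints, and A's ICD10 dict lookup by a scan over six character groups; objective: alternative.
def pvIcd9Ranges : List (Int × Int × String) := [
  (1, 5, "nervous_proc"), (30, 34, "respiratory_proc"),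
  (35, 39, "cardiovascular_proc"), (42, 54, "digestive_proc"),
  (55, 71, "genitourinary_proc"), (76, 84, "musculoskeletal_proc")]

def pvIcd10Body : PySem.Dict Char String := PySem.Dict.ofList [
  ('0', "nervous_proc"), ('1', "nervous_proc"),
  ('2', "cardiovascular_proc"), ('3', "cardiovascular_proc"),
  ('4', "cardiovascular_proc"), ('5', "cardiovascular_proc"),
  ('6', "cardiovascular_proc"),
  ('B', "respiratory_proc"),
  ('C', "digestive_proc"), ('D', "digestive_proc"), ('F', "digestive_proc"),
  ('T', "genitourinary_proc"), ('U', "genitourinary_proc"),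
  ('V', "genitourinary_proc"),
  ('L', "musculoskeletal_proc"), ('M', "musculoskeletal_proc"),
  ('N', "musculoskeletal_proc"), ('P', "musculoskeletal_proc"),
  ('Q', "musculoskeletal_proc"), ('R', "musculoskeletal_proc"),
  ('S', "musculoskeletal_proc")]

-- A's "for lo, hi, ch in _ICD9_PX_RANGES: if lo <= n <= hi: return ch" loop with early return
def pvScanRanges (n : Int) : List (Int × Int × String) → String
  | [] => "other_proc"
  | (lo, hi, ch) :: rest => if lo ≤ n ∧ n ≤ hi then ch else pvScanRanges n rest

-- In the else branch the pyGetD defaults are never reached: Python's short-circuit `or` checks len >= 2 first.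
def px_chapter_py (code : String) (version : Int) : String :=
  let cs := PySem.Chars.strip code.toList        -- code = str(code).strip()
  if version = 9 then
    match PySem.Int.ofChars? (PySem.List.slice cs none (some 2)) with  -- n = int(code[:2])
    | none => "other_proc"                        -- except ValueError
    | some n => pvScanRanges n pvIcd9Ranges       -- scan the ranges, first hit wins
  else
    if PySem.List.len cs < 2 ∨ PySem.List.pyGetD cs 0 ' ' ≠ '0' then "other_proc"
    else pvIcd10Body.getD (PySem.Chars.upperChar (PySem.List.pyGetD cs 1 ' ')) "other_proc"

-- ===== PORT B =====
def pvIcd9Bounds : List Int := [1, 6, 30, 35, 40, 42, 55, 72, 76, 85]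
def pvIcd9Labels : List String := ["other_proc", "nervous_proc", "other_proc", "respiratory_proc",
  "cardiovascular_proc", "other_proc", "digestive_proc",
  "genitourinary_proc", "other_proc", "musculoskeletal_proc",
  "other_proc"]

def pvIcd10Groups : List (List Char × String) := [
  (['0', '1'], "nervous_proc"),
  (['2', '3', '4', '5', '6'], "cardiovascular_proc"),
  (['B'], "respiratory_proc"),
  (['C', 'D', 'F'], "digestive_proc"),
  (['T', 'U', 'V'], "genitourinary_proc"),
  (['L', 'M', 'N', 'P', 'Q', 'R', 'S'], "musculoskeletal_proc")]

-- Source B's hand-written _bisect_right while-loop (lo, hi stay in [0, len], so the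
-- bounds.getD index is always in range and the default is never reached; the fuel
-- argument only makes the same computation structurally total: hi - lo shrinks each
-- iteration, so fuel = len + 1 is never exhausted)
def pvBisectGo (bounds : List Int) (x : Int) : Nat → Nat → Nat → Nat
  | 0, lo, _ => lo
  | fuel + 1, lo, hi =>
    if lo < hi then
      let mid := (lo + hi) / 2
      if x < bounds.getD mid 0 then pvBisectGo bounds x fuel lo mid
      else pvBisectGo bounds x fuel (mid + 1) hi
    else lo

def pvBisectRight (bounds : List Int) (x : Int) : Nat :=
  pvBisectGo bounds x (bounds.length + 1) 0 bounds.length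

-- Source B's "for chars, ch in _ICD10_PCS_GROUPS: if c in chars: return ch" loop
-- (`c in chars` on a 1-char c is exactly character membership)
def pvScanGroups (c : Char) : List (List Char × String) → String
  | [] => "other_proc"
  | (chars, ch) :: rest => if c ∈ chars then ch else pvScanGroups c rest

-- _ICD9_PX_LABELS[...] index is always in [0, 10], within the 11-entry list, so getD's default is never reached
def px_chapter_py_alt (code : String) (version : Int) : String :=
  let cs := PySem.Chars.strip code.toList        -- code = str(code).strip()
  if version = 9 then
    match PySem.Int.ofChars? (PySem.List.slice cs none (some 2)) with  -- n = int(code[:2])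
    | none => "other_proc"                        -- except ValueError
    | some n => pvIcd9Labels.getD (pvBisectRight pvIcd9Bounds n) "other_proc"
  else
    if PySem.List.len cs < 2 ∨ PySem.List.pyGetD cs 0 ' ' ≠ '0' then "other_proc"
    else pvScanGroups (PySem.Chars.upperChar (PySem.List.pyGetD cs 1 ' ')) pvIcd10Groups

-- ===== PRECONDITION & SPEC =====
def Spec_px_chapter_py (code : String) (version : Int) (out : String) : Prop := out = px_chapter_py_alt code version
instance (code : String) (version : Int) (out : String) : Decidable (Spec_px_chapter_py code version out) := by unfold Spec_px_chapter_py; infer_instance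

-- ===== CLAIM (what is proved, stated in full; the proofs are below) =====
def Claim_equal_px_chapter_py : Prop := ∀ (code : String) (version : Int), Dom_px_chapter_py code version → Spec_px_chapter_py code version (px_chapter_py code version)

-- ===== LEMMAS AND PROOFS =====

lemma go_step (bounds : List Int) (x : Int) (fuel lo hi : Nat) (h : lo < hi) :
    pvBisectGo bounds x (fuel + 1) lo hi =
      if x < bounds.getD ((lo + hi) / 2) 0 then pvBisectGo bounds x fuel lo ((lo + hi) / 2)
      else pvBisectGo bounds x fuel ((lo + hi) / 2 + 1) hi := by
  simp [pvBisectGo, h]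

lemma go_end (bounds : List Int) (x : Int) (fuel lo hi : Nat) (h : ¬ lo < hi) :
    pvBisectGo bounds x (fuel + 1) lo hi = lo := by
  simp [pvBisectGo, h]

lemma bisect_neg (n : Int) (h : n < 1) : pvBisectRight pvIcd9Bounds n = 0 := by
  unfold pvBisectRight
  rw [show pvIcd9Bounds.length = 10 from rfl]
  rw [go_step _ _ _ _ _ (by norm_num), if_pos (by simp [pvIcd9Bounds]; omega)]
  rw [go_step _ _ _ _ _ (by norm_num), if_pos (by simp [pvIcd9Bounds]; omega)]
  rw [go_step _ _ _ _ _ (by norm_num), if_pos (by simp [pvIcd9Bounds]; omega)]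
  rw [go_step _ _ _ _ _ (by norm_num), if_pos (by simp [pvIcd9Bounds]; omega)]
  rw [go_end _ _ _ _ _ (by norm_num)]

lemma bisect_big (n : Int) (h : 85 ≤ n) : pvBisectRight pvIcd9Bounds n = 10 := by
  unfold pvBisectRight
  rw [show pvIcd9Bounds.length = 10 from rfl]
  rw [go_step _ _ _ _ _ (by norm_num), if_neg (by simp [pvIcd9Bounds]; omega)]
  rw [go_step _ _ _ _ _ (by norm_num), if_neg (by simp [pvIcd9Bounds]; omega)]
  rw [go_step _ _ _ _ _ (by norm_num), if_neg (by simp [pvIcd9Bounds]; omega)]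
  rw [go_end _ _ _ _ _ (by norm_num)]

lemma scan_eq_bisect (n : Int) :
    pvScanRanges n pvIcd9Ranges = pvIcd9Labels.getD (pvBisectRight pvIcd9Bounds n) "other_proc" := by
  by_cases hn : 0 ≤ n ∧ n < 85
  · obtain ⟨h0, h1⟩ := hn
    interval_cases n <;> decide
  · rcases not_and_or.mp hn with h | h
    · rw [bisect_neg n (by omega)]
      simp only [pvScanRanges, pvIcd9Ranges]
      split_ifs <;> first | rfl | omega
    · rw [bisect_big n (by omega)]
      simp only [pvScanRanges, pvIcd9Ranges]
      split_ifs <;> first | rfl | omega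

def pvIcd10Pairs : List (Char × String) := [
  ('0', "nervous_proc"), ('1', "nervous_proc"),
  ('2', "cardiovascular_proc"), ('3', "cardiovascular_proc"),
  ('4', "cardiovascular_proc"), ('5', "cardiovascular_proc"),
  ('6', "cardiovascular_proc"),
  ('B', "respiratory_proc"),
  ('C', "digestive_proc"), ('D', "digestive_proc"), ('F', "digestive_proc"),
  ('T', "genitourinary_proc"), ('U', "genitourinary_proc"),
  ('V', "genitourinary_proc"),
  ('L', "musculoskeletal_proc"), ('M', "musculoskeletal_proc"),
  ('N', "musculoskeletal_proc"), ('P', "musculoskeletal_proc"),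
  ('Q', "musculoskeletal_proc"), ('R', "musculoskeletal_proc"),
  ('S', "musculoskeletal_proc")]

set_option maxHeartbeats 1000000 in
lemma icd10_mk : pvIcd10Body = PySem.Dict.mk pvIcd10Pairs := by decide

set_option maxHeartbeats 2000000 in
lemma dict_eq_groups (c : Char) :
    pvIcd10Body.getD c "other_proc" = pvScanGroups c pvIcd10Groups := by
  by_cases h0 : c = '0'
  · subst h0; decide
  by_cases h1 : c = '1'
  · subst h1; decide
  by_cases h2 : c = '2'
  · subst h2; decide
  by_cases h3 : c = '3'
  · subst h3; decide
  by_cases h4 : c = '4'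
  · subst h4; decide
  by_cases h5 : c = '5'
  · subst h5; decide
  by_cases h6 : c = '6'
  · subst h6; decide
  by_cases h7 : c = 'B'
  · subst h7; decide
  by_cases h8 : c = 'C'
  · subst h8; decide
  by_cases h9 : c = 'D'
  · subst h9; decide
  by_cases h10 : c = 'F'
  · subst h10; decide
  by_cases h11 : c = 'T'
  · subst h11; decide
  by_cases h12 : c = 'U'
  · subst h12; decide
  by_cases h13 : c = 'V'
  · subst h13; decide
  by_cases h14 : c = 'L'
  · subst h14; decide
  by_cases h15 : c = 'M'
  · subst h15; decide
  by_cases h16 : c = 'N'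
  · subst h16; decide
  by_cases h17 : c = 'P'
  · subst h17; decide
  by_cases h18 : c = 'Q'
  · subst h18; decide
  by_cases h19 : c = 'R'
  · subst h19; decide
  by_cases h20 : c = 'S'
  · subst h20; decide
  have hfind : pvIcd10Body.get? c = none := by
    rw [icd10_mk]
    simp only [pvIcd10Pairs]
    rw [PySem.Dict.get?_mk_cons, if_neg (by simp [Ne.symm h0])]
    rw [PySem.Dict.get?_mk_cons, if_neg (by simp [Ne.symm h1])]
    rw [PySem.Dict.get?_mk_cons, if_neg (by simp [Ne.symm h2])]
    rw [PySem.Dict.get?_mk_cons, if_neg (by simp [Ne.symm h3])]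
    rw [PySem.Dict.get?_mk_cons, if_neg (by simp [Ne.symm h4])]
    rw [PySem.Dict.get?_mk_cons, if_neg (by simp [Ne.symm h5])]
    rw [PySem.Dict.get?_mk_cons, if_neg (by simp [Ne.symm h6])]
    rw [PySem.Dict.get?_mk_cons, if_neg (by simp [Ne.symm h7])]
    rw [PySem.Dict.get?_mk_cons, if_neg (by simp [Ne.symm h8])]
    rw [PySem.Dict.get?_mk_cons, if_neg (by simp [Ne.symm h9])]
    rw [PySem.Dict.get?_mk_cons, if_neg (by simp [Ne.symm h10])]
    rw [PySem.Dict.get?_mk_cons, if_neg (by simp [Ne.symm h11])]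
    rw [PySem.Dict.get?_mk_cons, if_neg (by simp [Ne.symm h12])]
    rw [PySem.Dict.get?_mk_cons, if_neg (by simp [Ne.symm h13])]
    rw [PySem.Dict.get?_mk_cons, if_neg (by simp [Ne.symm h14])]
    rw [PySem.Dict.get?_mk_cons, if_neg (by simp [Ne.symm h15])]
    rw [PySem.Dict.get?_mk_cons, if_neg (by simp [Ne.symm h16])]
    rw [PySem.Dict.get?_mk_cons, if_neg (by simp [Ne.symm h17])]
    rw [PySem.Dict.get?_mk_cons, if_neg (by simp [Ne.symm h18])]
    rw [PySem.Dict.get?_mk_cons, if_neg (by simp [Ne.symm h19])]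
    rw [PySem.Dict.get?_mk_cons, if_neg (by simp [Ne.symm h20])]
    rfl
  have hrhs : pvScanGroups c pvIcd10Groups = "other_proc" := by
    simp [pvIcd10Groups, pvScanGroups, h0, h1, h2, h3, h4, h5, h6, h7, h8, h9, h10, h11, h12, h13, h14, h15, h16, h17, h18, h19, h20]
  rw [hrhs]
  simp [PySem.Dict.getD, hfind]

-- ===== VERDICT (by name: the statement is the Claim_ definition above) =====
set_option maxHeartbeats 1000000 in
theorem px_chapter_py_spec : Claim_equal_px_chapter_py := by
  intro code version _
  unfold Spec_px_chapter_py px_chapter_py px_chapter_py_alt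
  by_cases hv : version = 9
  · rw [if_pos hv, if_pos hv]
    cases PySem.Int.ofChars? (PySem.List.slice (PySem.Chars.strip code.toList) none (some 2)) with
    | none => rfl
    | some n => exact scan_eq_bisect n
  · rw [if_neg hv, if_neg hv]
    split_ifs with h
    · rfl
    · exact dict_eq_groups _
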